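-- pv_equiv track=rewrite | github.com/KhiopsML/khiops | test/LearningTest/cmd/python/_learning_test_utils.py | filter_process_id_prefix_from_lines
-- ===== SOURCE A (Python) =====
-- def filter_process_id_prefix_from_lines(lines):
--     """Retourne les lignes sans l'eventuel prefixe de process id, du type '[0] '
--     qui est emis par mpiexce dans les sorties standard"""
--     output_lines = []
--     for line in lines:
--         # En parallelle, une ligne vide peut contenir le numero du process entre crochets
--         pos_end = -1
--         is_process_id = len(line) > 0 and line[0] == "["
--         if is_process_id:
--             pos_end = line.find("]")
--             is_process_id = pos_end > 0 and line[1:pos_end].isdigit()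
--         if is_process_id:
--             line = line[pos_end + 1 :].lstrip()
--         output_lines.append(line)
--     return output_lines
-- ===== SOURCE B (Python) =====
-- def _strip_mpi_prefix(line):
--     # Direct character scan: '[', one-or-more digits, ']', then drop and lstrip.
--     if not line.startswith("["):
--         return line
--     i = 1
--     while i < len(line) and line[i].isdigit():
--         i += 1
--     if i > 1 and i < len(line) and line[i] == "]":
--         return line[i + 1:].lstrip()
--     return line
--
--
-- def filter_process_id_prefix_from_lines(lines):
--     return [_strip_mpi_prefix(line) for line in lines]
-- ===== Notes on version B (the rewrite author's own statement) =====
-- stated objective: alternative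
-- what changed: Replaces the find(']')/slice/isdigit check with a direct single forward character scan ('[', digits, ']') per line, mapped over the lines by a helper instead of an accumulator loop.
import Mathlib
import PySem

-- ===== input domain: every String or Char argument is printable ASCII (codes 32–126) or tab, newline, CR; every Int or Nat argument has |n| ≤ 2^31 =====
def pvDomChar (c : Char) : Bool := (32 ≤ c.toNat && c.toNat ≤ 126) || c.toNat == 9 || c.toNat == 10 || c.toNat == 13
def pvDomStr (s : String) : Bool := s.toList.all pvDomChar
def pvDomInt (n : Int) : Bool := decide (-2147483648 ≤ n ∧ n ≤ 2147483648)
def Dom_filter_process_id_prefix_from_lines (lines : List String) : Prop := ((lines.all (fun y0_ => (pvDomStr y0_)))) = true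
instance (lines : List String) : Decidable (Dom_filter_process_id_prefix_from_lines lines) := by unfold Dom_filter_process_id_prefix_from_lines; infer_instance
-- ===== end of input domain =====

-- B replaces A's find(']')/slice/isdigit parsing with a direct per-line character scan
-- ('[', one-or-more digits, ']'), mapped over the lines (objective: alternative, same cost).

-- ===== PORT A =====
-- per-line body of A's loop (transliteration of the loop body)
def pvFilterLineA (line : String) : String :=
  let cs := line.toList
  let pos_end : Int := -1
  let is_process_id := decide (0 < cs.length) && (cs.headD ' ' == '[')
  let pos_end := if is_process_id then PySem.Chars.find cs [']'] else pos_end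
  let is_process_id := if is_process_id then
      decide (0 < pos_end) && PySem.Chars.strIsdigit (PySem.Chars.slice cs (some 1) (some pos_end))
    else is_process_id
  if is_process_id then
    String.ofList (PySem.Chars.lstrip (PySem.Chars.slice cs (some (pos_end + 1)) none))
  else line

def filter_process_id_prefix_from_lines (lines : List String) : List String :=
  lines.foldl (fun output_lines line => output_lines ++ [pvFilterLineA line]) []

-- ===== PORT B =====
-- number of leading digit characters (B's while-loop counter)
def pvCountLeadingDigits : List Char → Nat
  | [] => 0
  | c :: cs => if PySem.Chars.isdigit c then pvCountLeadingDigits cs + 1 else 0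

def pvStripMpiPrefix (line : String) : String :=
  let cs := line.toList
  if PySem.Chars.startswith cs ['['] then
    let i := pvCountLeadingDigits cs.tail + 1
    if 1 < i ∧ i < cs.length ∧ cs.getD i ' ' = ']' then
      String.ofList (PySem.Chars.lstrip (cs.drop (i + 1)))
    else line
  else line

def filter_process_id_prefix_from_lines_alt (lines : List String) : List String :=
  lines.map pvStripMpiPrefix

-- ===== PRECONDITION & SPEC =====
def Spec_filter_process_id_prefix_from_lines (lines : List String) (out : List String) : Prop := out = filter_process_id_prefix_from_lines_alt lines
instance (lines : List String) (out : List String) : Decidable (Spec_filter_process_id_prefix_from_lines lines out) := by unfold Spec_filter_process_id_prefix_from_lines; infer_instance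

-- ===== CLAIM (what is proved, stated in full; the proofs are below) =====
def Claim_equal_filter_process_id_prefix_from_lines : Prop := ∀ (lines : List String), Dom_filter_process_id_prefix_from_lines lines → Spec_filter_process_id_prefix_from_lines lines (filter_process_id_prefix_from_lines lines)

-- ===== LEMMAS AND PROOFS =====

-- the maximal digit prefix: all of it is digits
theorem pvCLD_take_all (rest : List Char) :
    (rest.take (pvCountLeadingDigits rest)).all PySem.Chars.isdigit = true := by
  induction rest with
  | nil => simp [pvCountLeadingDigits]
  | cons c cs ih =>
    by_cases h : PySem.Chars.isdigit c
    · simp [pvCountLeadingDigits, h, ih]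
    · simp [pvCountLeadingDigits, h]

theorem pvCLD_unique (rest : List Char) (m : Nat)
    (h1 : (rest.take m).all PySem.Chars.isdigit = true)
    (h2 : m < rest.length)
    (h3 : PySem.Chars.isdigit (rest.getD m ' ') = false) :
    pvCountLeadingDigits rest = m := by
  induction rest generalizing m with
  | nil => simp at h2
  | cons c cs ih =>
    cases m with
    | zero =>
      simp at h3
      simp [pvCountLeadingDigits, h3]
    | succ m' =>
      simp [List.take_succ_cons, List.all_cons] at h1
      simp [pvCountLeadingDigits, h1.1]
      exact ih m' (by simpa using h1.2) (by simpa using h2) (by simpa using h3)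

-- singleton prefix of a drop = element at that index
theorem pvSingle_prefix_iff (cs : List Char) (j : Nat) (a : Char) :
    [a] <+: cs.drop j ↔ cs[j]? = some a := by
  rw [← List.head?_drop]
  cases h : (cs.drop j) with
  | nil => simp [List.cons_prefix_cons]
  | cons x t => simp [eq_comm]

-- A's find(']') lands exactly after the digit run when B's condition holds
theorem pvFind_eq (rest : List Char) (k : Nat)
    (hk1 : 1 ≤ k) (hk2 : k < rest.length) (hk3 : rest.getD k ' ' = ']')
    (hdig : (rest.take k).all PySem.Chars.isdigit = true) :
    PySem.Chars.find ('[' :: rest) [']'] = (k : Int) + 1 := by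
  have hrk : rest[k]? = some ']' := by
    rw [List.getElem?_eq_getElem hk2, ← List.getD_eq_getElem rest ' ' hk2, hk3]
  have hdigj : ∀ j : Nat, j < k → rest[j]? ≠ some ']' := by
    intro j hj h
    have hjlen : j < rest.length := lt_of_lt_of_le hj (le_of_lt hk2)
    have hjt : j < (rest.take k).length := by simp; omega
    have hmem : rest[j] ∈ rest.take k := by
      have := List.getElem_mem hjt
      rwa [List.getElem_take] at this
    have hd := (List.all_eq_true.mp hdig) _ hmem
    rw [List.getElem?_eq_getElem hjlen] at h
    have : rest[j] = ']' := by simpa using h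
    rw [this] at hd
    exact absurd hd (by decide)
  have hpref : [']'] <+: ('[' :: rest).drop (k + 1) := by
    rw [pvSingle_prefix_iff]
    simpa using hrk
  have h0 : 0 ≤ PySem.Chars.find ('[' :: rest) [']'] := by
    rw [PySem.Chars.find_nonneg_iff, ← PySem.Chars.isIn_iff_infix,
      ← PySem.Chars.exists_prefix_drop_iff_isIn]
    exact ⟨k + 1, hpref⟩
  obtain ⟨hat, hmin⟩ := PySem.Chars.find_spec h0
  set f := PySem.Chars.find ('[' :: rest) [']'] with hf
  have hle : f.toNat ≤ k + 1 := by
    by_contra hgt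
    exact hmin (k + 1) (by omega) hpref
  have hne : ∀ j : Nat, j ≤ k → ¬ ([']'] <+: ('[' :: rest).drop j) := by
    intro j hj hp
    rw [pvSingle_prefix_iff] at hp
    cases j with
    | zero => simp at hp
    | succ j' =>
      simp at hp
      exact hdigj j' (by omega) hp
  have heq : f.toNat = k + 1 := by
    rcases Nat.lt_or_ge f.toNat (k + 1) with h | h
    · exact absurd hat (hne f.toNat (by omega))
    · omega
  omega

-- per-line equivalence
theorem pvLine_eq (line : String) : pvFilterLineA line = pvStripMpiPrefix line := by
  unfold pvFilterLineA pvStripMpiPrefix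
  cases hcs : line.toList with
  | nil => simp [show PySem.Chars.startswith ([] : List Char) ['['] = false from by decide]
  | cons c rest =>
    by_cases hc : c = '['
    · subst hc
      have hsw : PySem.Chars.startswith ('[' :: rest) ['['] = true := by
        rw [PySem.Chars.startswith_iff, List.cons_prefix_cons]; simp
      by_cases hP : 1 ≤ pvCountLeadingDigits rest ∧ pvCountLeadingDigits rest < rest.length ∧
          rest.getD (pvCountLeadingDigits rest) ' ' = ']'
      · obtain ⟨hk1, hk2, hk3⟩ := hP
        have hfind := pvFind_eq rest (pvCountLeadingDigits rest) hk1 hk2 hk3 (pvCLD_take_all rest)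
        have hsl : PySem.List.slice ('[' :: rest) (some 1)
            (some ((pvCountLeadingDigits rest : Int) + 1)) = rest.take (pvCountLeadingDigits rest) := by
          rw [PySem.List.slice_toNat _ (by omega) (by omega)]
          have h1 : ((pvCountLeadingDigits rest : Int) + 1).toNat = pvCountLeadingDigits rest + 1 := by
            omega
          have h2 : ((1 : Int)).toNat = 1 := by omega
          simp [h1, h2]
        have hdig : PySem.Chars.strIsdigit (rest.take (pvCountLeadingDigits rest)) = true := by
          simp only [PySem.Chars.strIsdigit, Bool.and_eq_true, Bool.not_eq_true']
          refine ⟨?_, pvCLD_take_all rest⟩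
          have hne : rest.take (pvCountLeadingDigits rest) ≠ [] := by
            intro h
            have hlen := congrArg List.length h
            simp [List.length_take] at hlen
            rcases hlen with h0 | h0
            · omega
            · rw [h0] at hk2; simp at hk2
          simpa using hne
        have hout : PySem.List.slice ('[' :: rest)
            (some ((pvCountLeadingDigits rest : Int) + 1 + 1)) none =
            List.drop (pvCountLeadingDigits rest + 1) rest := by
          rw [PySem.List.slice_from _ (by omega)]
          have h1 : ((pvCountLeadingDigits rest : Int) + 1 + 1).toNat =
              (pvCountLeadingDigits rest + 1) + 1 := by omega
          simp [h1]
        have h3 : rest[pvCountLeadingDigits rest]?.getD ' ' = ']' := by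
          rw [List.getElem?_eq_getElem hk2, Option.getD_some, ← List.getD_eq_getElem rest ' ' hk2]
          exact hk3
        simp only [hsw, hfind]
        simp
        simp [hsl, hdig, hout, hk2, h3]
        intro hcontra
        have hkval : rest[pvCountLeadingDigits rest]'hk2 = ']' := by
          rw [← List.getD_eq_getElem rest ' ' hk2]; exact hk3
        exact absurd hkval (hcontra (by omega))
      · have hAneg : ¬ (0 < PySem.Chars.find ('[' :: rest) [']'] ∧
            PySem.Chars.strIsdigit (PySem.List.slice ('[' :: rest) (some 1)
              (some (PySem.Chars.find ('[' :: rest) [']']))) = true) := by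
          intro hT
          obtain ⟨hfpos, hdig⟩ := hT
          set f := PySem.Chars.find ('[' :: rest) [']'] with hf
          obtain ⟨hat, _⟩ := PySem.Chars.find_spec (le_of_lt hfpos)
          rw [pvSingle_prefix_iff] at hat
          have hflen : f ≤ ('[' :: rest).length := PySem.Chars.find_le_length _ _
          have hft : 1 ≤ f.toNat := by omega
          have hm : rest[f.toNat - 1]? = some ']' := by
            rw [show f.toNat = (f.toNat - 1) + 1 by omega] at hat
            simpa using hat
          have hmlen : f.toNat - 1 < rest.length := by
            by_contra hge
            rw [List.getElem?_eq_none (by omega)] at hm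
            exact absurd hm (by simp)
          have hsl : PySem.List.slice ('[' :: rest) (some 1) (some f) =
              rest.take (f.toNat - 1) := by
            rw [PySem.List.slice_toNat _ (by omega) (by omega)]
            have h2 : ((1 : Int)).toNat = 1 := by omega
            simp [h2]
          rw [hsl] at hdig
          simp only [PySem.Chars.strIsdigit, Bool.and_eq_true, Bool.not_eq_true'] at hdig
          obtain ⟨hne, hall⟩ := hdig
          have hm1 : 1 ≤ f.toNat - 1 := by
            by_contra h0
            have h00 : f.toNat - 1 = 0 := by omega
            rw [h00] at hne
            simp at hne
          have hgd : rest.getD (f.toNat - 1) ' ' = ']' := by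
            rw [List.getD_eq_getElem rest ' ' hmlen]
            rw [List.getElem?_eq_getElem hmlen] at hm
            simpa using hm
          have hiseq : PySem.Chars.isdigit (rest.getD (f.toNat - 1) ' ') = false := by
            rw [hgd]; decide
          have hku := pvCLD_unique rest (f.toNat - 1) hall hmlen hiseq
          exact hP ⟨by omega, by omega, by rw [hku]; exact hgd⟩
        have hBneg : ¬ (0 < pvCountLeadingDigits rest ∧
            pvCountLeadingDigits rest < rest.length ∧
            rest[pvCountLeadingDigits rest]?.getD ' ' = ']') := by
          intro ⟨h1, h2, h3⟩
          refine hP ⟨by omega, h2, ?_⟩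
          rw [List.getD_eq_getElem rest ' ' h2]
          rw [List.getElem?_eq_getElem h2, Option.getD_some] at h3
          exact h3
        simp only [hcs, hsw]
        simp
        rw [if_neg hAneg, if_neg hBneg]
    · have hsw : PySem.Chars.startswith (c :: rest) ['['] = false := by
        have hnp : ¬ (['['] <+: (c :: rest)) := by
          rw [List.cons_prefix_cons]
          intro ⟨h1, _⟩
          exact hc h1.symm
        rw [Bool.eq_false_iff]
        intro ht
        exact hnp ((PySem.Chars.startswith_iff _ _).mp ht)
      simp [hcs, hsw, hc]

theorem pvFoldl_append_map (f : String → String) (l : List String) (acc : List String) :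
    l.foldl (fun out line => out ++ [f line]) acc = acc ++ l.map f := by
  induction l generalizing acc with
  | nil => simp
  | cons x t ih => simp [ih]

-- ===== VERDICT (by name: the statement is the Claim_ definition above) =====
theorem filter_process_id_prefix_from_lines_spec : Claim_equal_filter_process_id_prefix_from_lines := by
  intro lines _
  unfold Spec_filter_process_id_prefix_from_lines filter_process_id_prefix_from_lines filter_process_id_prefix_from_lines_alt
  rw [pvFoldl_append_map pvFilterLineA]
  simp [funext pvLine_eq]
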